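-- pv_equiv track=rewrite | github.com/ilyakarelcev/Bioinformatics | protein_alignment_streamlit/app.py | normalize_protein_sequence
-- ===== SOURCE A (Python) =====
-- VALID_AA = set("ACDEFGHIKLMNPQRSTVWYBXZ")
--
-- def normalize_protein_sequence(sequence: str) -> tuple[str, list[str]]:
--     warnings_out: list[str] = []
--     sequence = sequence.replace("-", "").replace(".", "").replace("*", "")
--     replacements = {"U": "X", "O": "X", "J": "X"}
--     normalized = []
--     replaced: list[str] = []
--     dropped: list[str] = []
--
--     for char in sequence:
--         if char in replacements:
--             normalized.append(replacements[char])
--             replaced.append(char)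
--         elif char in VALID_AA:
--             normalized.append(char)
--         else:
--             dropped.append(char)
--
--     if replaced:
--         warnings_out.append(
--             "Residues U/O/J are not represented in BLOSUM62 here and were converted to X: "
--             + ", ".join(sorted(set(replaced)))
--         )
--     if dropped:
--         warnings_out.append(
--             "Unexpected symbols were removed: " + ", ".join(sorted(set(dropped)))
--         )
--
--     return "".join(normalized), warnings_out
-- ===== SOURCE B (Python) =====
-- VALID_AA = set("ACDEFGHIKLMNPQRSTVWYBXZ")
--
-- def normalize_protein_sequence(sequence: str) -> tuple[str, list[str]]:
--     s = sequence.replace("-", "").replace(".", "").replace("*", "")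
--     # classify each DISTINCT character once (in sorted order), building a
--     # translation table; then apply it to the whole string in one translate call
--     table = {}
--     replaced = []
--     dropped = []
--     for c in sorted(set(s)):
--         if c in "UOJ":
--             table[c] = "X"
--             replaced.append(c)
--         elif c not in VALID_AA:
--             table[c] = None
--             dropped.append(c)
--     normalized = s.translate(str.maketrans(table))
--     warnings_out = []
--     if replaced:
--         warnings_out.append(
--             "Residues U/O/J are not represented in BLOSUM62 here and were converted to X: "
--             + ", ".join(replaced)
--         )
--     if dropped:
--         warnings_out.append("Unexpected symbols were removed: " + ", ".join(dropped))
--     return normalized, warnings_out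
-- ===== Notes on version B (the rewrite author's own statement) =====
-- stated objective: faster
-- what changed: B replaces A's per-character loop with three accumulators by a table-driven algorithm: it classifies each distinct character once (iterating sorted(set(s))), building a translation table and the already-sorted deduplicated warning lists, then produces the normalized string with a single str.translate call.
import Mathlib
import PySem

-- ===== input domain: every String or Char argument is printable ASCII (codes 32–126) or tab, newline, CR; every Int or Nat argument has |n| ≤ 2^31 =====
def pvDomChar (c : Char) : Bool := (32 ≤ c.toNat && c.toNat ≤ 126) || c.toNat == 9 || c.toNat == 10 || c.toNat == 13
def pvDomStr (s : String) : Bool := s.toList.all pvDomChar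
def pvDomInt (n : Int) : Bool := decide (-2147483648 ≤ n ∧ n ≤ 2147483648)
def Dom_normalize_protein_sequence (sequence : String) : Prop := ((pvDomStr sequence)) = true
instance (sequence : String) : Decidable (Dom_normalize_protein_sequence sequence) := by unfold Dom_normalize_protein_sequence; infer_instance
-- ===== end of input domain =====

-- B classifies each DISTINCT character once (iterating sorted(set(s))) into a translation
-- table plus the already-sorted warning lists, then builds the normalized string with one
-- translate pass, instead of A's per-character loop with three accumulators (objective: faster,
-- measured: one C-level translate replaces the per-character Python loop).

-- shared module constants / message texts (identical literals in Source A and Source B)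
def pvValidAA : PySem.Set Char := PySem.Set.ofList "ACDEFGHIKLMNPQRSTVWYBXZ".toList
def pvRepl : PySem.Dict Char Char :=
  ((PySem.Dict.empty.insert 'U' 'X').insert 'O' 'X').insert 'J' 'X'
def pvStrip (sequence : String) : List Char :=
  PySem.Chars.replace (PySem.Chars.replace (PySem.Chars.replace sequence.toList ['-'] []) ['.'] []) ['*'] []
def pvWarn1 (cs : List Char) : String :=
  String.ofList ("Residues U/O/J are not represented in BLOSUM62 here and were converted to X: ".toList
    ++ PySem.Chars.join ", ".toList (cs.map (fun c => [c])))
def pvWarn2 (cs : List Char) : String :=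
  String.ofList ("Unexpected symbols were removed: ".toList
    ++ PySem.Chars.join ", ".toList (cs.map (fun c => [c])))

-- ===== PORT A =====
def normalize_protein_sequence (sequence : String) : String × List String :=
  let s := pvStrip sequence
  let st := s.foldl (fun (acc : List Char × List Char × List Char) char =>
      if PySem.Dict.contains pvRepl char then
        (acc.1 ++ [PySem.Dict.getD pvRepl char char], acc.2.1 ++ [char], acc.2.2)
      else if PySem.Set.contains pvValidAA char then
        (acc.1 ++ [char], acc.2.1, acc.2.2)
      else
        (acc.1, acc.2.1, acc.2.2 ++ [char]))
    ([], [], [])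
  let warnings_out :=
    (if st.2.1 = [] then [] else
      [pvWarn1 (PySem.List.sorted (PySem.Set.ofList st.2.1) (fun c => c) false)]) ++
    (if st.2.2 = [] then [] else
      [pvWarn2 (PySem.List.sorted (PySem.Set.ofList st.2.2) (fun c => c) false)])
  (String.ofList st.1, warnings_out)

-- ===== PORT B =====
def normalize_protein_sequence_alt (sequence : String) : String × List String :=
  let s := pvStrip sequence
  -- for c in sorted(set(s)): classify c once, building the translation table
  -- (some 'X' = maps to "X", none = deleted) and the replaced/dropped lists
  let st := (PySem.List.sorted (PySem.Set.ofList s) (fun c => c) false).foldl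
    (fun (acc : PySem.Dict Char (Option Char) × List Char × List Char) c =>
      if ['U', 'O', 'J'].contains c then
        (acc.1.insert c (some 'X'), acc.2.1 ++ [c], acc.2.2)
      else if PySem.Set.contains pvValidAA c then acc
      else
        (acc.1.insert c none, acc.2.1, acc.2.2 ++ [c]))
    (PySem.Dict.empty, [], [])
  -- s.translate(str.maketrans(table)): table value replaces (none deletes), absent key keeps
  let normalized := s.filterMap (fun c =>
      match PySem.Dict.get? st.1 c with
      | some v => v
      | none => some c)
  let warnings_out :=
    (if st.2.1 = [] then [] else [pvWarn1 st.2.1]) ++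
    (if st.2.2 = [] then [] else [pvWarn2 st.2.2])
  (String.ofList normalized, warnings_out)

-- ===== PRECONDITION & SPEC =====
def Spec_normalize_protein_sequence (sequence : String) (out : String × List String) : Prop := out = normalize_protein_sequence_alt sequence
instance (sequence : String) (out : String × List String) : Decidable (Spec_normalize_protein_sequence sequence out) := by unfold Spec_normalize_protein_sequence; infer_instance

-- ===== CLAIM (what is proved, stated in full; the proofs are below) =====
def Claim_equal_normalize_protein_sequence : Prop := ∀ (sequence : String), Dom_normalize_protein_sequence sequence → Spec_normalize_protein_sequence sequence (normalize_protein_sequence sequence)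

-- ===== LEMMAS AND PROOFS =====

-- A's membership test in the replacements dict is the "UOJ" test of B
theorem pv_repl_contains (c : Char) :
    PySem.Dict.contains pvRepl c = ['U', 'O', 'J'].contains c := by
  simp only [pvRepl, PySem.Dict.contains_insert, PySem.Dict.contains_empty,
    List.contains_eq_mem, List.mem_cons, List.not_mem_nil, or_false, Bool.or_false]
  cases h1 : c == 'U' <;> cases h2 : c == 'O' <;> cases h3 : c == 'J' <;> simp_all

theorem pv_getD_repl (c : Char) (h : (['U', 'O', 'J'].contains c) = true) :
    PySem.Dict.getD pvRepl c c = 'X' := by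
  simp only [List.contains_eq_mem, List.mem_cons, List.not_mem_nil, or_false,
    decide_eq_true_eq] at h
  rcases h with rfl | rfl | rfl <;> decide

-- a character not in the replacement dict translates to itself
theorem pv_getD_not_contains (c : Char) (h : PySem.Dict.contains pvRepl c = false) :
    PySem.Dict.getD pvRepl c c = c := by
  simp [pvRepl, PySem.Dict.contains_insert, PySem.Dict.contains_empty] at h
  simp [pvRepl, PySem.Dict.getD_insert, PySem.Dict.getD_empty, h]

-- A's three-accumulator loop computes a map-over-filter and two filters.
theorem pv_fold_char (s : List Char) (n r d : List Char) :
    s.foldl (fun (acc : List Char × List Char × List Char) char =>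
      if PySem.Dict.contains pvRepl char then
        (acc.1 ++ [PySem.Dict.getD pvRepl char char], acc.2.1 ++ [char], acc.2.2)
      else if PySem.Set.contains pvValidAA char then
        (acc.1 ++ [char], acc.2.1, acc.2.2)
      else
        (acc.1, acc.2.1, acc.2.2 ++ [char])) (n, r, d)
    = (n ++ (s.filter (fun c =>
          PySem.Dict.contains pvRepl c || PySem.Set.contains pvValidAA c)).map
          (fun c => PySem.Dict.getD pvRepl c c),
       r ++ s.filter (fun c => PySem.Dict.contains pvRepl c),
       d ++ s.filter (fun c =>
          !PySem.Dict.contains pvRepl c && !PySem.Set.contains pvValidAA c)) := by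
  induction s generalizing n r d with
  | nil => simp
  | cons c t ih =>
    cases h1 : PySem.Dict.contains pvRepl c with
    | true =>
      simp only [List.foldl_cons, h1, reduceIte]
      rw [ih]; simp [h1]
    | false =>
      cases h2 : PySem.Set.contains pvValidAA c with
      | true =>
        simp only [List.foldl_cons, h1, h2, Bool.false_eq_true, reduceIte]
        rw [ih]; simp [h1, pv_getD_not_contains c h1, List.mem_of_elem_eq_true h2]
      | false =>
        simp only [List.foldl_cons, h1, h2, Bool.false_eq_true, reduceIte]
        have h2' : c ∉ pvValidAA := by simpa using h2
        rw [ih]; simp [h1, h2']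

-- B's classification loop: the two warning lists it accumulates are filters of u.
theorem pv_fold_23 (p v : Char → Bool) (u : List Char)
    (t : PySem.Dict Char (Option Char)) (r d : List Char) :
    (u.foldl (fun (acc : PySem.Dict Char (Option Char) × List Char × List Char) c =>
        if p c then (acc.1.insert c (some 'X'), acc.2.1 ++ [c], acc.2.2)
        else if v c then acc
        else (acc.1.insert c none, acc.2.1, acc.2.2 ++ [c])) (t, r, d)).2
    = (r ++ u.filter p, d ++ u.filter (fun c => !(p c) && !(v c))) := by
  induction u generalizing t r d with
  | nil => simp
  | cons a u ih =>
    cases h1 : p a with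
    | true => simp [h1, ih]
    | false =>
      cases h2 : v a with
      | true => simp [h1, h2, ih]
      | false => simp [h1, h2, ih]

-- B's classification loop: what the translation table answers for each key.
theorem pv_fold_get (p v : Char → Bool) (u : List Char)
    (t : PySem.Dict Char (Option Char)) (r d : List Char) (c : Char) :
    ((u.foldl (fun (acc : PySem.Dict Char (Option Char) × List Char × List Char) c =>
        if p c then (acc.1.insert c (some 'X'), acc.2.1 ++ [c], acc.2.2)
        else if v c then acc
        else (acc.1.insert c none, acc.2.1, acc.2.2 ++ [c])) (t, r, d)).1).get? c
    = if c ∈ u then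
        (if p c then some (some 'X') else if v c then t.get? c else some none)
      else t.get? c := by
  induction u generalizing t r d with
  | nil => simp
  | cons a u ih =>
    by_cases e : c = a
    · subst e
      cases h1 : p c with
      | true =>
        simp only [List.foldl_cons, h1, if_true, ih, PySem.Dict.get?_insert]
        simp
      | false =>
        cases h2 : v c with
        | true => simp [h1, h2, ih]
        | false =>
          simp only [List.foldl_cons, h1, h2, Bool.false_eq_true, if_false, ih,
            PySem.Dict.get?_insert]
          simp
    · have hm : (c ∈ a :: u) = (c ∈ u) := by simp [List.mem_cons, e]
      cases h1 : p a with
      | true =>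
        simp only [List.foldl_cons, h1, if_true, ih, PySem.Dict.get?_insert, if_neg e, hm]
      | false =>
        cases h2 : v a with
        | true => simp only [List.foldl_cons, h1, h2, Bool.false_eq_true, if_false, if_true, ih, hm]
        | false =>
          simp only [List.foldl_cons, h1, h2, Bool.false_eq_true, if_false, ih,
            PySem.Dict.get?_insert, if_neg e, hm]

-- sorting the distinct elements commutes with filtering
theorem pv_sorted_filter (q : Char → Bool) (s : List Char) :
    PySem.List.sorted (PySem.Set.ofList (s.filter q)) (fun c => c) false
    = (PySem.List.sorted (PySem.Set.ofList s) (fun c => c) false).filter q := by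
  have h2 : ((PySem.List.sorted (PySem.Set.ofList s) (fun c => c) false)).Nodup :=
    (PySem.List.sorted_perm _ _ _).nodup_iff.mpr (PySem.Set.nodup_ofList s)
  refine PySem.List.sorted_eq_of_perm_of_pairwise_lt _ _ (fun c => c) ?_ ?_
  · rw [List.perm_ext_iff_of_nodup (h2.filter q) (PySem.Set.nodup_ofList _)]
    intro x
    simp [PySem.List.mem_sorted, PySem.Set.mem_ofList, List.mem_filter, and_comm]
  · have h1 := PySem.List.sorted_pairwise (PySem.Set.ofList s) (fun c : Char => c)
    exact ((h1.and h2).imp (fun h => lt_of_le_of_ne h.1 h.2)).filter q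

theorem pv_sorted_ofList_nil (l : List Char) :
    (PySem.List.sorted (PySem.Set.ofList l) (fun c => c) false = []) ↔ l = [] := by
  rw [PySem.List.sorted_eq_nil_iff, List.eq_nil_iff_forall_not_mem, List.eq_nil_iff_forall_not_mem]
  simp [PySem.Set.mem_ofList]

-- a filterMap whose function is filter-then-map pointwise on s
theorem pv_map_filter_eq_filterMap (p : Char → Bool) (g : Char → Char)
    (f : Char → Option Char) (s : List Char)
    (hf : ∀ c ∈ s, f c = if p c then some (g c) else none) :
    s.filterMap f = (s.filter p).map g := by
  induction s with
  | nil => rfl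
  | cons a s ih =>
    have ha := hf a (List.mem_cons_self ..)
    cases h : p a with
    | true =>
      simp only [List.filterMap_cons, ha, h, if_true, List.filter_cons, List.map_cons]
      rw [ih (fun c hc => hf c (List.mem_cons_of_mem _ hc))]
    | false =>
      simp only [List.filterMap_cons, ha, h, Bool.false_eq_true, if_false, List.filter_cons]
      exact ih (fun c hc => hf c (List.mem_cons_of_mem _ hc))

-- ===== VERDICT (by name: the statement is the Claim_ definition above) =====
theorem normalize_protein_sequence_spec : Claim_equal_normalize_protein_sequence := by
  intro sequence _
  unfold Spec_normalize_protein_sequence normalize_protein_sequence normalize_protein_sequence_alt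
  simp only [pv_fold_char, List.nil_append]
  simp only [pv_repl_contains, pv_fold_23, pv_fold_get, List.nil_append]
  rw [← pv_sorted_filter, ← pv_sorted_filter]
  simp only [pv_sorted_ofList_nil]
  refine Prod.ext ?_ rfl
  simp only []
  congr 1
  refine (pv_map_filter_eq_filterMap _ _ _ _ ?_).symm
  intro c hc
  have hcu : c ∈ PySem.List.sorted (PySem.Set.ofList (pvStrip sequence)) (fun c => c) false := by
    rw [PySem.List.mem_sorted, PySem.Set.mem_ofList]; exact hc
  simp only [hcu, if_true]
  cases h1 : (['U', 'O', 'J'].contains c) with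
  | true => simp [pv_getD_repl c h1]
  | false =>
    cases h2 : PySem.Set.contains pvValidAA c with
    | true =>
      simp [PySem.Dict.get?_empty,
        pv_getD_not_contains c (by rw [pv_repl_contains]; exact h1)]
    | false => simp
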